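-- pv_equiv track=rewrite | github.com/ziggy1030/linyaps-packager-skill | scripts/build_from_project.py | parse_debian_control_field
-- ===== SOURCE A (Python) =====
-- def parse_debian_control_field(control_text, field_name):
--     lines = control_text.splitlines()
--     collecting = False
--     chunks = []
--     field_prefix = f"{field_name}:"
--     for line in lines:
--         if not collecting:
--             if line.startswith(field_prefix):
--                 collecting = True
--                 chunks.append(line[len(field_prefix):].strip())
--             continue
--         if not line.strip():
--             break
--         if line.startswith((" ", "\t")) or line.lstrip().startswith("#"):
--             stripped = line.strip()
--             if stripped.startswith("#"):
--                 continue
--             chunks.append(stripped)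
--             continue
--         break
--     return " ".join(part for part in chunks if part).strip()
-- ===== SOURCE B (Python) =====
-- def parse_debian_control_field(control_text, field_name):
--     # Staged-passes formulation: comprehensions + slicing, no state machine.
--     lines = control_text.splitlines()
--     prefix = field_name + ":"
--     headers = [i for i, l in enumerate(lines) if l.startswith(prefix)]
--     if not headers:
--         return ""
--     i = headers[0]
--     first = lines[i][len(prefix):].strip()
--     tail = lines[i + 1:]
--     stops = [j for j, l in enumerate(tail)
--              if not l.strip() or not (l.startswith((" ", "\t")) or l.lstrip().startswith("#"))]
--     block = tail[:stops[0]] if stops else tail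
--     parts = [first] + [l.strip() for l in block if not l.strip().startswith("#")]
--     return " ".join(p for p in parts if p).strip()
-- ===== Notes on version B (the rewrite author's own statement) =====
-- stated objective: alternative
-- what changed: Replaces A's single collecting-flag state machine with staged passes: comprehensions index the header lines and the stop lines, slicing cuts out the continuation block, and a filter/map over that block builds the parts list.
import Mathlib
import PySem

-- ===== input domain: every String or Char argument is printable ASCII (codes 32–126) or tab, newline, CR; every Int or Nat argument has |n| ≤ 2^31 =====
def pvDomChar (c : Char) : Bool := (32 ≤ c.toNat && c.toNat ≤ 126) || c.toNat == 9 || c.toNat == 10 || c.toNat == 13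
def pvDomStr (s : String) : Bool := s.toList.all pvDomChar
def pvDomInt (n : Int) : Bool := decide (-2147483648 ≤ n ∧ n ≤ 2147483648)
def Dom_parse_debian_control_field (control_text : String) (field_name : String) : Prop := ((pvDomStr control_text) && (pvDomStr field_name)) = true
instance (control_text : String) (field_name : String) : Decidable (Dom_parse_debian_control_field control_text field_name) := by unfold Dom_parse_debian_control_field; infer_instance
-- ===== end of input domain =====

-- B replaces A's single collecting-flag state machine by staged passes built from
-- comprehensions and slicing: index the header lines, index the stop lines, slice
-- out the continuation block, then filter/map it (objective: simpler; same cost).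

-- ===== PORT A =====
-- A's single loop over the lines with the `collecting` flag and the `chunks`
-- accumulator; `break` is modelled by returning the accumulator.
def pvALoop (fp : List Char) : List (List Char) → Bool → List (List Char) → List (List Char)
  | [], _, chunks => chunks
  | line :: rest, collecting, chunks =>
    if collecting = false then
      if PySem.Chars.startswith line fp then
        pvALoop fp rest true (chunks ++ [PySem.Chars.strip (PySem.List.slice line (some (fp.length : Int)) none)])
      else
        pvALoop fp rest false chunks
    else if (PySem.Chars.strip line).isEmpty then
      chunks
    else if PySem.Chars.startswith line [' '] || PySem.Chars.startswith line ['\t']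
            || PySem.Chars.startswith (PySem.Chars.lstrip line) ['#'] then
      if PySem.Chars.startswith (PySem.Chars.strip line) ['#'] then
        pvALoop fp rest true chunks
      else
        pvALoop fp rest true (chunks ++ [PySem.Chars.strip line])
    else
      chunks

def parse_debian_control_field (control_text : String) (field_name : String) : String :=
  let lines := PySem.Chars.splitlines control_text.toList
  let field_prefix := field_name.toList ++ [':']
  let chunks := pvALoop field_prefix lines false []
  String.ofList (PySem.Chars.strip (PySem.Chars.join [' '] (chunks.filter (fun p => !p.isEmpty))))

-- ===== PORT B =====
-- the `stops` comprehension's condition: blank line, or neither indented nor a comment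
def pvStopB (line : List Char) : Bool :=
  !(!(PySem.Chars.strip line).isEmpty) ||
  !(PySem.Chars.startswith line [' '] || PySem.Chars.startswith line ['\t']
      || PySem.Chars.startswith (PySem.Chars.lstrip line) ['#'])

def parse_debian_control_field_alt (control_text : String) (field_name : String) : String :=
  let lines := PySem.Chars.splitlines control_text.toList
  let pfx := field_name.toList ++ [':']
  let headers := ((PySem.List.enumerate lines).filter
      (fun p => PySem.Chars.startswith p.2 pfx)).map Prod.fst
  match headers with
  | [] => ""
  | i :: _ =>
    -- lines[i]: i comes from the enumerate comprehension, so it is in range (pyGetD exact here)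
    let first := PySem.Chars.strip
      (PySem.List.slice (PySem.List.pyGetD lines i []) (some (pfx.length : Int)) none)
    let tail := PySem.List.slice lines (some (i + 1)) none
    let stops := ((PySem.List.enumerate tail).filter (fun p => pvStopB p.2)).map Prod.fst
    let block := match stops with
      | [] => tail
      | j :: _ => PySem.List.slice tail none (some j)
    let parts := first ::
      ((block.filter (fun l => !PySem.Chars.startswith (PySem.Chars.strip l) ['#'])).map
        PySem.Chars.strip)
    String.ofList (PySem.Chars.strip (PySem.Chars.join [' '] (parts.filter (fun p => !p.isEmpty))))

-- ===== PRECONDITION & SPEC =====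
def Spec_parse_debian_control_field (control_text : String) (field_name : String) (out : String) : Prop := out = parse_debian_control_field_alt control_text field_name
instance (control_text : String) (field_name : String) (out : String) : Decidable (Spec_parse_debian_control_field control_text field_name out) := by unfold Spec_parse_debian_control_field; infer_instance

-- ===== CLAIM (what is proved, stated in full; the proofs are below) =====
def Claim_equal_parse_debian_control_field : Prop := ∀ (control_text : String) (field_name : String), Dom_parse_debian_control_field control_text field_name → Spec_parse_debian_control_field control_text field_name (parse_debian_control_field control_text field_name)

-- ===== LEMMAS AND PROOFS =====

-- proof-only intermediate form of the search phase
def pvFind (fp : List Char) : List (List Char) → Option (List Char × List (List Char))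
  | [] => none
  | line :: rest =>
    if PySem.Chars.startswith line fp then
      some (PySem.Chars.strip (PySem.List.slice line (some (fp.length : Int)) none), rest)
    else
      pvFind fp rest

-- enumerate with any start is the shift of enumerate from 0
theorem pv_enum_shift {α : Type} (xs : List α) (s : Int) :
    PySem.List.enumerate xs s = (PySem.List.enumerate xs 0).map (fun p => (p.1 + s, p.2)) := by
  induction xs generalizing s with
  | nil => simp [PySem.List.enumerate_nil]
  | cons x xs ih =>
    rw [PySem.List.enumerate_cons, PySem.List.enumerate_cons, ih (s + 1),
      show (0 : Int) + 1 = 1 from rfl, ih 1]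
    simp only [List.map_cons, List.map_map, zero_add]
    refine congrArg₂ _ rfl (List.map_congr_left ?_)
    intro p _
    simp only [Function.comp_apply]
    exact congrArg₂ _ (by ring) rfl

-- an index produced by `enumerate(xs)` is a natural number
theorem pv_enum0_fst {α : Type} (xs : List α) (p : Int × α) (h : p ∈ PySem.List.enumerate xs 0) :
    ∃ k : Nat, p.1 = (k : Int) := by
  rw [PySem.List.mem_enumerate_iff] at h
  obtain ⟨k, hk, rfl⟩ := h
  exact ⟨k, by simp⟩

-- normalising the shifted headers comprehension back to the unshifted one
theorem pv_shift_headers (fp : List Char) (xs : List (Int × List Char)) :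
    List.map Prod.fst (List.filter (fun p => PySem.Chars.startswith p.2 fp)
      (List.map (fun p => (p.1 + 1, p.2)) xs))
    = List.map (fun i => i + 1) (List.map Prod.fst
        (List.filter (fun p => PySem.Chars.startswith p.2 fp) xs)) := by
  simp [List.filter_map, List.map_map, Function.comp_def]

-- normalising the shifted stops comprehension back to the unshifted one
theorem pv_shift_stops (xs : List (Int × List Char)) :
    List.map Prod.fst (List.filter (fun p => pvStopB p.2)
      (List.map (fun p => (p.1 + 1, p.2)) xs))
    = List.map (fun i => i + 1) (List.map Prod.fst (List.filter (fun p => pvStopB p.2) xs)) := by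
  simp [List.filter_map, List.map_map, Function.comp_def]

-- A's searching phase equals pvFind
theorem pv_loop_false (fp : List Char) (lines : List (List Char)) (chunks : List (List Char)) :
    pvALoop fp lines false chunks =
      (match pvFind fp lines with
       | none => chunks
       | some (first, rest) => pvALoop fp rest true (chunks ++ [first])) := by
  induction lines generalizing chunks with
  | nil => simp [pvALoop, pvFind]
  | cons line rest ih =>
    rw [pvALoop, pvFind]
    by_cases h : PySem.Chars.startswith line fp = true
    · simp [h]
    · simp only [Bool.not_eq_true] at h
      simp [h, ih]

-- B's headers comprehension + indexing/slicing computes pvFind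
theorem pv_headers (fp : List Char) (lines : List (List Char)) :
    (match ((PySem.List.enumerate lines).filter
        (fun p => PySem.Chars.startswith p.2 fp)).map Prod.fst with
     | [] => (none : Option (List Char × List (List Char)))
     | i :: _ => some (PySem.Chars.strip
          (PySem.List.slice (PySem.List.pyGetD lines i []) (some (fp.length : Int)) none),
        PySem.List.slice lines (some (i + 1)) none))
    = pvFind fp lines := by
  induction lines with
  | nil => simp [PySem.List.enumerate_nil, pvFind]
  | cons line rest ih =>
    rw [pvFind, PySem.List.enumerate_cons]
    by_cases h : PySem.Chars.startswith line fp = true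
    · have h1 : PySem.List.pyGetD (line :: rest) 0 ([] : List Char) = line := by
        simp [PySem.List.pyGetD_ofNat']
      have h2 : PySem.List.slice (line :: rest) (some 1) none = rest := by
        have := PySem.List.slice_from_natCast (line :: rest) 1
        simpa using this
      simp [h, h1, h2]
    · simp only [Bool.not_eq_true] at h
      rw [show (0 : Int) + 1 = 1 from rfl, pv_enum_shift rest 1]
      simp only [List.filter_cons, h, Bool.false_eq_true, if_false]
      rw [pv_shift_headers, ← ih]
      cases he : (List.filter (fun p => PySem.Chars.startswith p.2 fp)
          (PySem.List.enumerate rest)).map Prod.fst with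
      | nil => simp
      | cons i t =>
        have hmem : i ∈ (List.filter (fun p => PySem.Chars.startswith p.2 fp)
            (PySem.List.enumerate rest)).map Prod.fst := by
          rw [he]; exact List.mem_cons_self ..
        obtain ⟨q, hqf, hq1⟩ := List.mem_map.mp hmem
        obtain ⟨k, hk⟩ := pv_enum0_fst rest q (List.mem_of_mem_filter hqf)
        rw [hq1] at hk
        subst hk
        have g1 : PySem.List.pyGetD (line :: rest) ((k : Int) + 1) ([] : List Char)
            = PySem.List.pyGetD rest (k : Int) ([] : List Char) := by
          have e0 : ((k : Int) + 1) = ((k + 1 : Nat) : Int) := by push_cast; ring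
          rw [e0, PySem.List.pyGetD_natCast, PySem.List.pyGetD_natCast]
          simp [List.getD]
        have g2 : PySem.List.slice (line :: rest) (some ((k : Int) + 1 + 1)) none
            = PySem.List.slice rest (some ((k : Int) + 1)) none := by
          have e1 : ((k : Int) + 1 + 1) = ((k + 2 : Nat) : Int) := by push_cast; ring
          have e2 : ((k : Int) + 1) = ((k + 1 : Nat) : Int) := by push_cast; ring
          rw [e1, e2, PySem.List.slice_from_natCast, PySem.List.slice_from_natCast]
          simp [List.drop]
        simp only [List.map_cons]
        simp [g1, g2]

-- B's stops comprehension + slice computes takeWhile of the non-stop lines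
theorem pv_stops (tail : List (List Char)) :
    (match ((PySem.List.enumerate tail).filter (fun p => pvStopB p.2)).map Prod.fst with
     | [] => tail
     | j :: _ => PySem.List.slice tail none (some j))
    = tail.takeWhile (fun l => !pvStopB l) := by
  induction tail with
  | nil => simp [PySem.List.enumerate_nil]
  | cons line rest ih =>
    rw [PySem.List.enumerate_cons]
    by_cases h : pvStopB line = true
    · have h0 : PySem.List.slice (line :: rest) none (some ((0 : Nat) : Int))
          = ((line :: rest).take 0) := PySem.List.slice_to_natCast (line :: rest) 0
      simp only [List.filter_cons, h, if_true, List.map_cons, List.takeWhile_cons,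
        Bool.not_true]
      simpa using h0
    · simp only [Bool.not_eq_true] at h
      rw [show (0 : Int) + 1 = 1 from rfl, pv_enum_shift rest 1]
      simp only [List.filter_cons, h, Bool.false_eq_true, if_false, List.takeWhile_cons,
        Bool.not_false, if_true]
      rw [pv_shift_stops, ← ih]
      cases he : (List.filter (fun p => pvStopB p.2) (PySem.List.enumerate rest)).map
          Prod.fst with
      | nil => simp
      | cons j t =>
        have hmem : j ∈ (List.filter (fun p => pvStopB p.2)
            (PySem.List.enumerate rest)).map Prod.fst := by
          rw [he]; exact List.mem_cons_self ..
        obtain ⟨q, hqf, hq1⟩ := List.mem_map.mp hmem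
        obtain ⟨k, hk⟩ := pv_enum0_fst rest q (List.mem_of_mem_filter hqf)
        rw [hq1] at hk
        subst hk
        have g : PySem.List.slice (line :: rest) none (some ((k : Int) + 1))
            = line :: PySem.List.slice rest none (some (k : Int)) := by
          have e1 : ((k : Int) + 1) = ((k + 1 : Nat) : Int) := by push_cast; ring
          rw [e1, PySem.List.slice_to_natCast, PySem.List.slice_to_natCast]
          simp [List.take]
        simp only [List.map_cons]
        simp [g]

-- proof-only recursive form of the collecting phase
def pvCollect : List (List Char) → List (List Char)
  | [] => []
  | line :: rest =>
    if (PySem.Chars.strip line).isEmpty then []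
    else if PySem.Chars.startswith line [' '] || PySem.Chars.startswith line ['\t']
        || PySem.Chars.startswith (PySem.Chars.lstrip line) ['#'] then
      if PySem.Chars.startswith (PySem.Chars.strip line) ['#'] then pvCollect rest
      else PySem.Chars.strip line :: pvCollect rest
    else []

-- A's collecting phase equals pvCollect
theorem pv_loop_true (fp : List Char) (lines : List (List Char)) (chunks : List (List Char)) :
    pvALoop fp lines true chunks = chunks ++ pvCollect lines := by
  induction lines generalizing chunks with
  | nil => simp [pvALoop, pvCollect]
  | cons line rest ih =>
    rw [pvALoop, pvCollect]
    by_cases h0 : (PySem.Chars.strip line).isEmpty = true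
    · simp [h0]
    · by_cases hind : (PySem.Chars.startswith line [' '] || PySem.Chars.startswith line ['\t']
          || PySem.Chars.startswith (PySem.Chars.lstrip line) ['#']) = true
      · by_cases hsc : PySem.Chars.startswith (PySem.Chars.strip line) ['#'] = true
        · simp [h0, hind, hsc, ih]
        · simp [h0, hind, hsc, ih, List.append_assoc]
      · simp [h0, hind]

-- pvCollect is B's takeWhile-filter-map pipeline
theorem pv_collect_pipeline (lines : List (List Char)) :
    pvCollect lines =
      ((lines.takeWhile (fun l => !pvStopB l)).filter
        (fun l => !PySem.Chars.startswith (PySem.Chars.strip l) ['#'])).map PySem.Chars.strip := by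
  induction lines with
  | nil => simp [pvCollect]
  | cons line rest ih =>
    rw [pvCollect, List.takeWhile_cons]
    by_cases h0 : (PySem.Chars.strip line).isEmpty = true
    · have hstop : pvStopB line = true := by simp [pvStopB, h0]
      simp [h0, hstop]
    · by_cases hind : (PySem.Chars.startswith line [' '] || PySem.Chars.startswith line ['\t']
          || PySem.Chars.startswith (PySem.Chars.lstrip line) ['#']) = true
      · have hstop : pvStopB line = false := by simp [pvStopB, h0, hind]
        by_cases hsc : PySem.Chars.startswith (PySem.Chars.strip line) ['#'] = true
        · simp [h0, hind, hsc, hstop, ih]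
        · simp [h0, hind, hsc, hstop, ih]
      · have hstop : pvStopB line = true := by
          simp only [Bool.not_eq_true] at hind
          simp [pvStopB, h0, hind]
        simp [h0, hind, hstop]

-- ===== VERDICT (by name: the statement is the Claim_ definition above) =====
theorem parse_debian_control_field_spec : Claim_equal_parse_debian_control_field := by
  intro control_text field_name _
  show parse_debian_control_field control_text field_name
      = parse_debian_control_field_alt control_text field_name
  simp only [parse_debian_control_field, parse_debian_control_field_alt, pv_loop_false]
  rw [← pv_headers]
  cases hh : ((PySem.List.enumerate (PySem.Chars.splitlines control_text.toList)).filter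
      (fun p => PySem.Chars.startswith p.2 (field_name.toList ++ [':']))).map Prod.fst with
  | nil =>
    simp [PySem.Chars.join, PySem.Chars.strip, PySem.Chars.lstrip, PySem.Chars.rstrip,
      List.intercalate]
  | cons i t =>
    simp only [pv_loop_true, pv_collect_pipeline, List.nil_append, ← pv_stops]
    simp [List.cons_append]
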